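-- pv_equiv track=rewrite | github.com/sekgobela-kevin/naval | src/pynavy/crawler/crawler.py | get_start_end_indexes
-- ===== SOURCE A (Python) =====
-- from typing import List
--
-- def get_start_end_indexes(sections_texts: List[str]):
--     '''Returns start, end indexes from list of texts\n
--     sections_texts - list of texts for each section'''
--     start_end_indexes = []
--     # calculate star and end indexes from sections_texts
--     # start_index and end_index will be changed in loop
--     start_index = 0
--     end_index = 0
--     for sections_text in sections_texts:
--         # increment end index
--         # start index does not need to be incremented
--         end_index += len(sections_text)
--         start_end_indexes.append((start_index, end_index))
--         # increment start index to be used next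
--         start_index += len(sections_text)
--     return tuple(start_end_indexes)
-- ===== SOURCE B (Python) =====
-- def get_start_end_indexes(sections_texts):
--     # Divide and conquer: solve each half on relative offsets, then shift
--     # the right half's pairs by the left half's total length.
--     def solve(texts):
--         n = len(texts)
--         if n == 0:
--             return (), 0
--         if n == 1:
--             length = len(texts[0])
--             return ((0, length),), length
--         left, llen = solve(texts[:n // 2])
--         right, rlen = solve(texts[n // 2:])
--         return left + tuple((s + llen, e + llen) for s, e in right), llen + rlen
--     return solve(sections_texts)[0]
-- ===== Notes on version B (the rewrite author's own statement) =====
-- stated objective: alternative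
-- what changed: Replaces A's single forward pass with running start/end counters by a divide-and-conquer: each half is solved on relative offsets and the right half's pairs are shifted by the left half's total length when merging.
import Mathlib
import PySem

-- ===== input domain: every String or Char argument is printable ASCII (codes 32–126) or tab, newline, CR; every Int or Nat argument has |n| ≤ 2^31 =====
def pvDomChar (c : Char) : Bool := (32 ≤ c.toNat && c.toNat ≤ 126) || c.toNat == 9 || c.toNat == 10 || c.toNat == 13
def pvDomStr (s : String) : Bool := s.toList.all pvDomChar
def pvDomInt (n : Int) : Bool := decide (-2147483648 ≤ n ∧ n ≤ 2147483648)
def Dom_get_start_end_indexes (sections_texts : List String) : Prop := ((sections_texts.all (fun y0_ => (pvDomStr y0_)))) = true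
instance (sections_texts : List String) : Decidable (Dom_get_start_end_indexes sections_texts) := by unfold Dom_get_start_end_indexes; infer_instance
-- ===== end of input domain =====

-- B computes the offsets by divide-and-conquer (solve halves on relative offsets, shift the right half by the left half's total length) instead of A's forward loop with running counters.


-- ===== PORT A =====
-- literal port of A's loop: state (start_index, end_index, start_end_indexes)
def goA : List String → Int → Int → List (Int × Int) → List (Int × Int)
  | [], _, _, acc => acc
  | t :: ts, s, e, acc =>
      let e' := e + PySem.Str.len t
      goA ts (s + PySem.Str.len t) e' (acc ++ [(s, e')])

def get_start_end_indexes (sections_texts : List String) : List (Int × Int) :=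
  goA sections_texts 0 0 []

-- ===== PORT B =====
-- Source B's solve: divide and conquer on texts[:n//2] / texts[n//2:], returning
-- (relative pairs, total length); the right half's pairs are shifted by the
-- left half's total length.
def solveB : List String → (List (Int × Int)) × Int
  | [] => ([], 0)
  | [t] =>
      let length := PySem.Str.len t
      ([(0, length)], length)
  | t :: t' :: rest =>
      let texts := t :: t' :: rest
      let n := texts.length
      let l := solveB (texts.take (n / 2))
      let r := solveB (texts.drop (n / 2))
      (l.1 ++ r.1.map (fun p => (p.1 + l.2, p.2 + l.2)), l.2 + r.2)
  termination_by ts => ts.length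
  decreasing_by all_goals simp; omega

def get_start_end_indexes_alt (sections_texts : List String) : List (Int × Int) :=
  (solveB sections_texts).1

-- ===== PRECONDITION & SPEC =====
def Spec_get_start_end_indexes (sections_texts : List String) (out : List (Int × Int)) : Prop := out = get_start_end_indexes_alt sections_texts
instance (sections_texts : List String) (out : List (Int × Int)) : Decidable (Spec_get_start_end_indexes sections_texts out) := by unfold Spec_get_start_end_indexes; infer_instance

-- ===== CLAIM =====
def Claim_equal_get_start_end_indexes : Prop := ∀ (sections_texts : List String), Dom_get_start_end_indexes sections_texts → Spec_get_start_end_indexes sections_texts (get_start_end_indexes sections_texts)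

-- ===== LEMMAS AND PROOFS =====
-- reference form of the result: pairs relative to offset 0, built head-first
def pairsOf : List String → List (Int × Int)
  | [] => []
  | t :: ts =>
      (0, PySem.Str.len t) :: (pairsOf ts).map (fun p => (p.1 + PySem.Str.len t, p.2 + PySem.Str.len t))

def sumLen (ts : List String) : Int := (ts.map PySem.Str.len).sum

theorem pairsOf_append (l r : List String) :
    pairsOf (l ++ r) = pairsOf l ++ (pairsOf r).map (fun p => (p.1 + sumLen l, p.2 + sumLen l)) := by
  induction l with
  | nil => simp [pairsOf, sumLen]
  | cons t l ih =>
      simp only [List.cons_append, pairsOf, ih, List.map_append, List.map_map, sumLen,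
        List.map_cons, List.sum_cons, List.cons.injEq, true_and]
      refine congrArg _ ?_
      apply List.map_congr_left
      intro p _
      simp only [Function.comp_apply, Prod.ext_iff]
      constructor <;> ring

theorem solveB_eq (ts : List String) : solveB ts = (pairsOf ts, sumLen ts) := by
  induction ts using solveB.induct with
  | case1 => simp [solveB, pairsOf, sumLen]
  | case2 t => simp [solveB, pairsOf, sumLen]
  | case3 t t' rest texts n ihl ihr =>
      rw [solveB, ihl, ihr]
      have h := pairsOf_append ((t :: t' :: rest).take ((t :: t' :: rest).length / 2))
        ((t :: t' :: rest).drop ((t :: t' :: rest).length / 2))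
      rw [List.take_append_drop] at h
      have hs : sumLen ((t :: t' :: rest).take ((t :: t' :: rest).length / 2)) +
          sumLen ((t :: t' :: rest).drop ((t :: t' :: rest).length / 2)) = sumLen (t :: t' :: rest) := by
        unfold sumLen
        rw [← List.sum_append, ← List.map_append, List.take_append_drop]
      simp only [Prod.mk.injEq]
      exact ⟨h.symm, hs⟩

theorem goA_eq (ts : List String) (c : Int) (acc : List (Int × Int)) :
    goA ts c c acc = acc ++ (pairsOf ts).map (fun p => (p.1 + c, p.2 + c)) := by
  induction ts generalizing c acc with
  | nil => simp [goA, pairsOf]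
  | cons t ts ih =>
      simp only [goA, pairsOf, List.map_cons, List.map_map]
      rw [ih]
      simp only [List.append_assoc, List.singleton_append]
      refine congrArg _ ?_
      refine congrArg₂ _ (by simp [Prod.ext_iff]; ring) ?_
      apply List.map_congr_left
      intro p _
      simp only [Function.comp_apply]
      simp [Prod.ext_iff]; constructor <;> ring

-- ===== VERDICT =====
theorem get_start_end_indexes_spec : Claim_equal_get_start_end_indexes := by
  intro ts _
  unfold Spec_get_start_end_indexes get_start_end_indexes get_start_end_indexes_alt
  rw [solveB_eq]
  simpa using goA_eq ts 0 []
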